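-- pv_equiv track=rewrite | github.com/avigold/postwriter | src/postwriter/export/epub.py | _prose_to_html
-- ===== SOURCE A (Python) =====
-- def _prose_to_html(prose: str) -> str:
--     """Convert plain prose text to HTML paragraphs."""
--     import html
--
--     lines = prose.strip().split("\n")
--     paragraphs = []
--     current = []
--
--     for line in lines:
--         line = line.strip()
--         if not line:
--             if current:
--                 text = " ".join(current)
--                 paragraphs.append(f"<p>{html.escape(text)}</p>")
--                 current = []
--         else:
--             current.append(line)
--
--     if current:
--         text = " ".join(current)
--         paragraphs.append(f"<p>{html.escape(text)}</p>")
--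
--     return "\n".join(paragraphs)
-- ===== SOURCE B (Python) =====
-- from itertools import groupby
--
-- _ESCAPES = str.maketrans({
--     "&": "&amp;",
--     "<": "&lt;",
--     ">": "&gt;",
--     '"': "&quot;",
--     "'": "&#x27;",
-- })
--
--
-- def _prose_to_html(prose: str) -> str:
--     """Convert plain prose text to HTML paragraphs."""
--     lines = (line.strip() for line in prose.strip().split("\n"))
--     blocks = [list(run) for nonblank, run in groupby(lines, key=bool) if nonblank]
--     return "\n".join(f"<p>{' '.join(block).translate(_ESCAPES)}</p>" for block in blocks)
-- ===== Notes on version B (the rewrite author's own statement) =====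
-- stated objective: alternative
-- what changed: Replaces A's stateful accumulate-and-flush loop (paragraphs list + current buffer with a trailing flush) by a two-pass pipeline: itertools.groupby first partitions the stripped lines into maximal non-blank runs, then each run is rendered as a <p> element (escaped via a str.translate table instead of html.escape) and joined.
import Mathlib
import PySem

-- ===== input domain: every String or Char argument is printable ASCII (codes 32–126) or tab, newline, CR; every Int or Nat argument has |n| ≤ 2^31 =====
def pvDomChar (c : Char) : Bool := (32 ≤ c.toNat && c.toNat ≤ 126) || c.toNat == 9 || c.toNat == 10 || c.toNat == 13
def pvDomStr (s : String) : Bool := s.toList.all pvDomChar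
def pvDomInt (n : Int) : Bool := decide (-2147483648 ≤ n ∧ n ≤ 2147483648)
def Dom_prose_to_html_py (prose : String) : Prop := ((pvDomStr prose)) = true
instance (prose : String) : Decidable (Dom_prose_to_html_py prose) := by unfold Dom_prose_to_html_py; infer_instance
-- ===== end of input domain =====

-- B replaces A's stateful accumulate/flush loop by a two-pass pipeline: group lines into non-blank runs, then render each run as an escaped <p> element (alternative decomposition, same cost).

-- ===== PORT A =====
-- html.escape(s) (quote=True): the five replacements in CPython's order
def pyHtmlEscape (s : String) : String :=
  PySem.Str.replace (PySem.Str.replace (PySem.Str.replace (PySem.Str.replace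
    (PySem.Str.replace s "&" "&amp;") "<" "&lt;") ">" "&gt;") "\"" "&quot;") "'" "&#x27;"

def prose_to_html_py (prose : String) : String :=
  let lines := (PySem.Str.split? (PySem.Str.strip prose) "\n").getD []
  let st := lines.foldl (fun (st : List String × List String) line =>
      let line := PySem.Str.strip line
      if line = "" then
        if st.2 ≠ [] then
          (st.1 ++ ["<p>" ++ pyHtmlEscape (PySem.Str.join " " st.2) ++ "</p>"], [])
        else st
      else (st.1, st.2 ++ [line])) ([], [])
  let paragraphs :=
    if st.2 ≠ [] then st.1 ++ ["<p>" ++ pyHtmlEscape (PySem.Str.join " " st.2) ++ "</p>"]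
    else st.1
  PySem.Str.join "\n" paragraphs

-- ===== PORT B =====
-- s.translate(_ESCAPES): each char is looked up in the table, unmapped chars pass through
def pvEscChar (c : Char) : List Char :=
  if c = '&' then "&amp;".toList
  else if c = '<' then "&lt;".toList
  else if c = '>' then "&gt;".toList
  else if c = '"' then "&quot;".toList
  else if c = '\'' then "&#x27;".toList
  else [c]

def pvTranslate (s : String) : String := String.ofList (s.toList.flatMap pvEscChar)

-- groupby(lines, key=bool) keeping the truthy runs: skip a blank line, otherwise
-- the run is the maximal non-blank prefix and grouping continues after it
def pvBlocks : List String → List (List String)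
  | [] => []
  | l :: rest =>
    if l = "" then pvBlocks rest
    else (l :: rest.takeWhile (fun x => x ≠ "")) :: pvBlocks (rest.dropWhile (fun x => x ≠ ""))
termination_by ls => ls.length
decreasing_by
  · simp
  · have := List.length_dropWhile_le (fun x => decide (x ≠ "")) rest
    simp only [List.length_cons]
    omega

def prose_to_html_py_alt (prose : String) : String :=
  let lines := ((PySem.Str.split? (PySem.Str.strip prose) "\n").getD []).map PySem.Str.strip
  PySem.Str.join "\n"
    ((pvBlocks lines).map (fun b => "<p>" ++ pvTranslate (PySem.Str.join " " b) ++ "</p>"))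

-- ===== PRECONDITION & SPEC =====
def Spec_prose_to_html_py (prose : String) (out : String) : Prop := out = prose_to_html_py_alt prose
instance (prose : String) (out : String) : Decidable (Spec_prose_to_html_py prose out) := by unfold Spec_prose_to_html_py; infer_instance

-- ===== CLAIM (what is proved, stated in full; the proofs are below) =====
def Claim_equal_prose_to_html_py : Prop := ∀ (prose : String), Dom_prose_to_html_py prose → Spec_prose_to_html_py prose (prose_to_html_py prose)

-- ===== LEMMAS AND PROOFS =====

-- html.escape agrees with the translate-table escape, character by character
lemma pv_go_single (o : Char) (new : List Char) :
    ∀ (l : List Char) (fuel : Nat) (acc : List Char), l.length ≤ fuel →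
      PySem.Chars.replace.go [o] new fuel l acc
        = acc.reverse ++ l.flatMap (fun c => if c = o then new else [c]) := by
  intro l
  induction l with
  | nil =>
    intro fuel acc _
    cases fuel <;> simp [PySem.Chars.replace.go]
  | cons c t ih =>
    intro fuel acc h
    cases fuel with
    | zero => simp at h
    | succ f =>
      rw [PySem.Chars.replace.go]
      by_cases hc : c = o
      · subst hc
        simp only [List.isPrefixOf, beq_self_eq_true, Bool.true_and, if_true]
        have hd : List.drop [c].length (c :: t) = t := by simp
        rw [hd, ih f (new.reverse ++ acc) (by simpa using Nat.le_of_succ_le_succ h)]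
        simp
      · have hp : ([o].isPrefixOf (c :: t)) = false := by
          simp [List.isPrefixOf]; intro hh; exact absurd hh.symm hc
        rw [hp]
        simp only [Bool.false_eq_true, if_false]
        rw [ih f (c :: acc) (by simpa using Nat.le_of_succ_le_succ h)]
        simp [hc]

lemma pv_replace_single (o : Char) (new : List Char) (cs : List Char) :
    PySem.Chars.replace cs [o] new = cs.flatMap (fun c => if c = o then new else [c]) := by
  rw [PySem.Chars.replace]
  simp only [List.isEmpty]
  exact pv_go_single o new cs cs.length [] le_rfl

lemma pv_escape_eq (s : String) : pyHtmlEscape s = pvTranslate s := by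
  unfold pyHtmlEscape pvTranslate PySem.Str.replace
  refine congrArg String.ofList ?_
  simp only [show "&".toList = ['&'] from rfl, show "<".toList = ['<'] from rfl,
    show ">".toList = ['>'] from rfl, show "\"".toList = ['"'] from rfl,
    show "'".toList = ['\''] from rfl, String.toList_ofList]
  rw [pv_replace_single, pv_replace_single, pv_replace_single, pv_replace_single,
    pv_replace_single]
  rw [List.flatMap_assoc, List.flatMap_assoc, List.flatMap_assoc, List.flatMap_assoc]
  apply List.flatMap_congr
  intro c _
  by_cases h1 : c = '&'
  · subst h1; decide
  by_cases h2 : c = '<'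
  · subst h2; decide
  by_cases h3 : c = '>'
  · subst h3; decide
  by_cases h4 : c = '"'
  · subst h4; decide
  by_cases h5 : c = '\''
  · subst h5; decide
  simp [pvEscChar, h1, h2, h3, h4, h5]

def pvPara (b : List String) : String := "<p>" ++ pyHtmlEscape (PySem.Str.join " " b) ++ "</p>"

def pvStep (st : List String × List String) (line : String) : List String × List String :=
  if line = "" then
    if st.2 ≠ [] then (st.1 ++ [pvPara st.2], []) else st
  else (st.1, st.2 ++ [line])

def pvFlush (st : List String × List String) : List String :=
  if st.2 ≠ [] then st.1 ++ [pvPara st.2] else st.1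

lemma pv_takeWhile_all {p : String → Bool} (xs ys : List String) (h : ∀ x ∈ xs, p x = true) :
    (xs ++ ys).takeWhile p = xs ++ ys.takeWhile p := by
  induction xs with
  | nil => simp
  | cons a t ih =>
    simp only [List.cons_append, List.takeWhile_cons, h a (by simp)]
    simp [ih (fun x hx => h x (by simp [hx]))]

lemma pv_dropWhile_all {p : String → Bool} (xs ys : List String) (h : ∀ x ∈ xs, p x = true) :
    (xs ++ ys).dropWhile p = ys.dropWhile p := by
  induction xs with
  | nil => simp
  | cons a t ih =>
    simp only [List.cons_append, List.dropWhile_cons, h a (by simp)]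
    exact ih (fun x hx => h x (by simp [hx]))

lemma pvBlocks_all_ne (cur : List String) (hne : cur ≠ []) (h : ∀ x ∈ cur, x ≠ "") :
    pvBlocks cur = [cur] := by
  cases cur with
  | nil => exact absurd rfl hne
  | cons c cs =>
    rw [pvBlocks]
    have hc : ¬ c = "" := h c (by simp)
    rw [if_neg hc]
    have ht : cs.takeWhile (fun x => x ≠ "") = cs := by
      have := pv_takeWhile_all (p := fun x => decide (x ≠ "")) cs [] ?_
      · simpa using this
      · intro x hx; simp [h x (by simp [hx])]
    have hd : cs.dropWhile (fun x => x ≠ "") = [] := by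
      have := pv_dropWhile_all (p := fun x => decide (x ≠ "")) cs [] ?_
      · simpa using this
      · intro x hx; simp [h x (by simp [hx])]
    rw [ht, hd, show pvBlocks [] = [] from by rw [pvBlocks]]

lemma pv_key (ls : List String) : ∀ (ps cur : List String), (∀ x ∈ cur, x ≠ "") →
    pvFlush (ls.foldl pvStep (ps, cur)) = ps ++ (pvBlocks (cur ++ ls)).map pvPara := by
  induction ls with
  | nil =>
    intro ps cur h
    by_cases hc : cur = []
    · subst hc; simp [pvFlush, pvBlocks]
    · simp [pvFlush, hc, pvBlocks_all_ne cur hc h]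
  | cons l ls ih =>
    intro ps cur h
    by_cases hl : l = ""
    · subst hl
      by_cases hc : cur = []
      · subst hc
        have hs : pvStep (ps, ([] : List String)) "" = (ps, []) := by simp [pvStep]
        rw [List.foldl_cons, hs, ih ps [] (by simp)]
        have h3 : pvBlocks ("" :: ls) = pvBlocks ls := by rw [pvBlocks]; simp
        simp [h3]
      · have hs : pvStep (ps, cur) "" = (ps ++ [pvPara cur], []) := by simp [pvStep, hc]
        rw [List.foldl_cons, hs, ih (ps ++ [pvPara cur]) [] (by simp)]
        cases cur with
        | nil => exact absurd rfl hc
        | cons c cs =>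
          have hc' : ¬ c = "" := h c (by simp)
          have hcs : ∀ x ∈ cs, (fun x => decide (x ≠ "")) x = true := by
            intro x hx; simp [h x (by simp [hx])]
          rw [List.cons_append, pvBlocks, if_neg hc',
              pv_takeWhile_all cs ("" :: ls) hcs, pv_dropWhile_all cs ("" :: ls) hcs]
          have h1 : ("" :: ls).takeWhile (fun x => x ≠ "") = [] := by simp
          have h2 : ("" :: ls).dropWhile (fun x => x ≠ "") = "" :: ls := by simp
          rw [h1, h2]
          have h3 : pvBlocks ("" :: ls) = pvBlocks ls := by rw [pvBlocks]; simp
          rw [h3]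
          simp
    · have hs : pvStep (ps, cur) l = (ps, cur ++ [l]) := by simp [pvStep, hl]
      rw [List.foldl_cons, hs,
          ih ps (cur ++ [l]) (by intro x hx
                                 rcases List.mem_append.1 hx with h1 | h1
                                 · exact h x h1
                                 · simp at h1; subst h1; exact hl)]
      have : (cur ++ [l]) ++ ls = cur ++ l :: ls := by simp
      rw [this]

-- ===== VERDICT (by name: the statement is the Claim_ definition above) =====
set_option maxHeartbeats 1000000 in
theorem prose_to_html_py_spec : Claim_equal_prose_to_html_py := by
  intro prose _
  show PySem.Str.join "\n"
      (pvFlush (List.foldl (fun st line => pvStep st (PySem.Str.strip line)) ([], [])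
        ((PySem.Str.split? (PySem.Str.strip prose) "\n").getD [])))
    = PySem.Str.join "\n"
      (List.map (fun b => "<p>" ++ pvTranslate (PySem.Str.join " " b) ++ "</p>")
        (pvBlocks (List.map PySem.Str.strip ((PySem.Str.split? (PySem.Str.strip prose) "\n").getD []))))
  rw [← List.foldl_map]
  rw [pv_key _ [] [] (by simp)]
  rw [List.nil_append]
  have hfun : pvPara = (fun b => "<p>" ++ pvTranslate (PySem.Str.join " " b) ++ "</p>") := by
    funext b
    simp [pvPara, pv_escape_eq]
  rw [hfun, List.nil_append]
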